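-- pv_equiv track=rewrite | github.com/realAYAYA/UnrealEngine-ToonLit | UnrealEngine/Engine/Extras/ushell/channels/unreal/core/pylib/unreal/platforms/win64/win64.py | _get_version_string
-- ===== SOURCE A (Python) =====
-- def _get_version_string(versions):
--     msvc_versions = list(x for x in versions if x >= "14.")
--     if not msvc_versions:
--         return
--
--     sdk_versions = list(x for x in versions if x.startswith("10."))
--     if not sdk_versions:
--         return
--
--     return max(sdk_versions) + "-" + max(msvc_versions)
-- ===== SOURCE B (Python) =====
-- def _get_version_string(versions):
--     # Sort once in descending order; the maximum of each category is then
--     # simply the first element matching that category's predicate.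
--     desc = sorted(versions, reverse=True)
--     best_msvc = next((x for x in desc if x >= "14."), None)
--     if best_msvc is None:
--         return None
--     best_sdk = next((x for x in desc if x.startswith("10.")), None)
--     if best_sdk is None:
--         return None
--     return best_sdk + "-" + best_msvc
-- ===== Notes on version B (the rewrite author's own statement) =====
-- stated objective: alternative
-- what changed: Instead of building two filtered lists and taking max() of each, B sorts the list descending once and takes the first element matching each predicate (first match in a descending-sorted list is the maximum).
import Mathlib
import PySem

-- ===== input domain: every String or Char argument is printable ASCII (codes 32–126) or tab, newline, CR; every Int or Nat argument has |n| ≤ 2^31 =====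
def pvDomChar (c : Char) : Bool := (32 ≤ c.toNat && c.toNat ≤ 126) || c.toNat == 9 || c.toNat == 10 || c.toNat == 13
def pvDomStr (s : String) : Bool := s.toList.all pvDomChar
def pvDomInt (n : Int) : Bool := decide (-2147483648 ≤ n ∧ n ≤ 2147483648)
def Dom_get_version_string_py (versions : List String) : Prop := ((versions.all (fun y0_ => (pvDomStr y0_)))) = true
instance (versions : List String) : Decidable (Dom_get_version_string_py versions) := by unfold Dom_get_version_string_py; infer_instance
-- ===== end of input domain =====

-- B sorts the list descending once and takes the first element matching each predicate
-- (first match in a descending-sorted list is the maximum), instead of A's two filtered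
-- lists plus two max() calls; alternative algorithm, same result.
-- ===== PORT A =====
def get_version_string_py (versions : List String) : Option String :=
  let msvc_versions := versions.filter (fun x => decide (("14." : String) ≤ x))
  if msvc_versions.isEmpty then none
  else
    let sdk_versions := versions.filter (fun x => PySem.Str.startswith x "10.")
    if sdk_versions.isEmpty then none
    else
      match PySem.List.max? sdk_versions (fun y => y), PySem.List.max? msvc_versions (fun y => y) with
      | some a, some b => some (a ++ "-" ++ b)
      | _, _ => none

-- ===== PORT B =====
def get_version_string_py_alt (versions : List String) : Option String :=
  let desc := PySem.List.sorted versions (fun x => x) true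
  match desc.find? (fun x => decide (("14." : String) ≤ x)) with
  | none => none
  | some best_msvc =>
    match desc.find? (fun x => PySem.Str.startswith x "10.") with
    | none => none
    | some best_sdk => some (best_sdk ++ "-" ++ best_msvc)

-- ===== PRECONDITION & SPEC =====
def Spec_get_version_string_py (versions : List String) (out : Option String) : Prop := out = get_version_string_py_alt versions
instance (versions : List String) (out : Option String) : Decidable (Spec_get_version_string_py versions out) := by unfold Spec_get_version_string_py; infer_instance

-- ===== CLAIM =====
def Claim_equal_get_version_string_py : Prop := ∀ (versions : List String), Dom_get_version_string_py versions → Spec_get_version_string_py versions (get_version_string_py versions)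

-- ===== LEMMAS AND PROOFS =====

-- in a list sorted in descending order, every element satisfying p is ≤ the first match
theorem find?_desc_isMax (p : String → Bool) :
    ∀ (l : List String), l.Pairwise (fun a b => b ≤ a) →
      ∀ m, l.find? p = some m → ∀ y ∈ l, p y = true → y ≤ m := by
  intro l
  induction l with
  | nil => intro _ m h; simp at h
  | cons x t ih =>
    intro hpw m hf y hy hpy
    rcases List.pairwise_cons.mp hpw with ⟨hx, ht⟩
    by_cases hpx : p x = true
    · rw [List.find?_cons_of_pos hpx] at hf
      cases hf
      rcases List.mem_cons.mp hy with rfl | hyt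
      · exact le_refl _
      · exact hx y hyt
    · rw [List.find?_cons_of_neg hpx] at hf
      rcases List.mem_cons.mp hy with rfl | hyt
      · exact absurd hpy hpx
      · exact ih ht m hf y hyt hpy

-- first match in the descending-sorted list = max of the filtered original list
theorem find?_sorted_eq_max?_filter (p : String → Bool) (versions : List String) :
    (PySem.List.sorted versions (fun x => x) true).find? p
      = PySem.List.max? (versions.filter p) (fun y => y) := by
  have hperm : (PySem.List.sorted versions (fun x => x) true).Perm versions :=
    PySem.List.sorted_perm versions (fun x => x) true
  have hpw : (PySem.List.sorted versions (fun x => x) true).Pairwise (fun a b => b ≤ a) :=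
    PySem.List.sorted_pairwise_rev versions (fun x => x)
  rcases hf : (PySem.List.sorted versions (fun x => x) true).find? p with _ | m
  · have hall := List.find?_eq_none.mp hf
    have hnil : versions.filter p = [] := by
      apply List.filter_eq_nil_iff.mpr
      intro a ha
      exact hall a (hperm.mem_iff.mpr ha)
    rw [hnil]; rfl
  · have hpm : p m = true := List.find?_some hf
    have hmem : m ∈ versions := hperm.mem_iff.mp (List.mem_of_find?_eq_some hf)
    have hmf : m ∈ versions.filter p := List.mem_filter.mpr ⟨hmem, hpm⟩
    rcases hM : PySem.List.max? (versions.filter p) (fun y => y) with _ | M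
    · exact absurd ((PySem.List.max?_eq_none_iff _ _).mp hM ▸ hmf) (List.not_mem_nil)
    · have hMf : M ∈ versions.filter p := PySem.List.max?_mem hM
      have hMle : M ≤ m := by
        rcases List.mem_filter.mp hMf with ⟨hMv, hpM⟩
        exact find?_desc_isMax p _ hpw m hf M (hperm.mem_iff.mpr hMv) hpM
      have hmle : m ≤ M := PySem.List.max?_isMax hM m hmf
      rw [le_antisymm hmle hMle]

-- ===== VERDICT =====
theorem get_version_string_py_spec : Claim_equal_get_version_string_py := by
  intro versions _
  unfold Spec_get_version_string_py get_version_string_py get_version_string_py_alt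
  simp only [find?_sorted_eq_max?_filter]
  rcases hm : PySem.List.max? (versions.filter (fun x => decide (("14." : String) ≤ x))) (fun y => y) with _ | b
  · have h0 : versions.filter (fun x => decide (("14." : String) ≤ x)) = [] :=
      (PySem.List.max?_eq_none_iff _ _).mp hm
    simp
  · have h0 : (versions.filter (fun x => decide (("14." : String) ≤ x))).isEmpty = false := by
      rcases h : (versions.filter (fun x => decide (("14." : String) ≤ x))).isEmpty
      · rfl
      · rw [List.isEmpty_iff.mp h] at hm; simp [PySem.List.max?] at hm
    rcases hs : PySem.List.max? (versions.filter (fun x => PySem.Str.startswith x "10.")) (fun y => y) with _ | a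
    · have h1 : versions.filter (fun x => PySem.Str.startswith x "10.") = [] :=
        (PySem.List.max?_eq_none_iff _ _).mp hs
      simp
    · have h1 : (versions.filter (fun x => PySem.Str.startswith x "10.")).isEmpty = false := by
        rcases h : (versions.filter (fun x => PySem.Str.startswith x "10.")).isEmpty
        · rfl
        · rw [List.isEmpty_iff.mp h] at hs; simp [PySem.List.max?] at hs
      rw [h0, h1]; rfl
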